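-- pv_equiv track=rewrite | github.com/thomhopmans/adventofcode | 2021/adventofcode/exercises/exercise_24.py | get_instruction_blocks
-- ===== SOURCE A (Python) =====
-- def get_instruction_blocks(instructions: list[str]) -> list[list[str]]:
--     """Split the instructions into blocks starting with 'inp'."""
--     blocks = []
--     current_block = []
--
--     for instruction in instructions:
--         # New block
--         if instruction.startswith("inp"):
--             if current_block:
--                 blocks.append(current_block)
--             current_block = [instruction]
--         # Append to existing block
--         else:
--             current_block.append(instruction)
--
--     # Add last block adn return
--     if current_block:
--         blocks.append(current_block)
--
--     return blocks
-- ===== SOURCE B (Python) =====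
-- def get_instruction_blocks(instructions: list[str]) -> list[list[str]]:
--     """Split the instructions into blocks starting with 'inp'."""
--     blocks = []
--     i, n = 0, len(instructions)
--     while i < n:
--         # scan for the next block boundary after i
--         j = i + 1
--         while j < n and not instructions[j].startswith("inp"):
--             j += 1
--         blocks.append(instructions[i:j])
--         i = j
--     return blocks
-- ===== Notes on version B (the rewrite author's own statement) =====
-- stated objective: alternative
-- what changed: Replaces A's single accumulator pass (growing current_block element by element and flushing it at each 'inp') with a two-pointer index scan: an inner loop finds the next 'inp' boundary j and the whole block is taken as the slice instructions[i:j].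
import Mathlib
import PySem

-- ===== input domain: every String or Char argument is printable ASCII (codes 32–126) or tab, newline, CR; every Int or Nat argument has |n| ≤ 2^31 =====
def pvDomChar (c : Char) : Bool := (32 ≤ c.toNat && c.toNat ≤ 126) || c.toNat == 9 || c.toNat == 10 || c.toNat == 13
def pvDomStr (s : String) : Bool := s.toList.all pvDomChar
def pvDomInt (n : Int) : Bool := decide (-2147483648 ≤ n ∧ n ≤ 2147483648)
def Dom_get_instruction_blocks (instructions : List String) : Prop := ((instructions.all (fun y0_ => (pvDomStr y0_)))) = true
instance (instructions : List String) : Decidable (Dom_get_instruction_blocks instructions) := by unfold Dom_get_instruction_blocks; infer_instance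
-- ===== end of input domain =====

-- B replaces A's accumulator pass with a two-pointer boundary scan plus slicing; same O(n) cost (objective: alternative).

-- ===== PORT A =====
-- fold state = (blocks, current_block), exactly A's loop
def get_instruction_blocks (instructions : List String) : List (List String) :=
  let st := instructions.foldl
    (fun (st : List (List String) × List String) instruction =>
      if PySem.Str.startswith instruction "inp" then
        ((if st.2 ≠ [] then st.1 ++ [st.2] else st.1), [instruction])
      else
        (st.1, st.2 ++ [instruction]))
    ([], [])
  if st.2 ≠ [] then st.1 ++ [st.2] else st.1

-- ===== PORT B =====
-- inner while loop: advance j while j < n and instructions[j] does not start with "inp";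
-- instructions[j] has 0 ≤ j < n here, so List.getD is exact for Python's indexing
def altScan (instructions : List String) (j : Nat) : Nat :=
  if j < instructions.length ∧ ¬ PySem.Str.startswith (instructions.getD j "") "inp" then
    altScan instructions (j + 1)
  else j
termination_by instructions.length - j
decreasing_by omega

-- the inner loop never moves j backwards (cited by the outer loop's decreasing_by)
theorem altScan_ge (instructions : List String) (j : Nat) : j ≤ altScan instructions j := by
  fun_induction altScan with
  | case1 j h ih => omega
  | case2 j h => omega

-- outer while loop: i is the start of the current block, the appended block is the
-- slice instructions[i:j] (0 ≤ i ≤ j, so drop/take is exact for Python's slice)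
def altLoop (instructions : List String) (i : Nat) (blocks : List (List String)) : List (List String) :=
  if i < instructions.length then
    let j := altScan instructions (i + 1)
    altLoop instructions j (blocks ++ [(instructions.drop i).take (j - i)])
  else blocks
termination_by instructions.length - i
decreasing_by
  have := altScan_ge instructions (i + 1)
  omega

def get_instruction_blocks_alt (instructions : List String) : List (List String) :=
  altLoop instructions 0 []

-- ===== PRECONDITION & SPEC =====
def Spec_get_instruction_blocks (instructions : List String) (out : List (List String)) : Prop := out = get_instruction_blocks_alt instructions
instance (instructions : List String) (out : List (List String)) : Decidable (Spec_get_instruction_blocks instructions out) := by unfold Spec_get_instruction_blocks; infer_instance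

-- ===== CLAIM (what is proved, stated in full; the proofs are below) =====
def Claim_equal_get_instruction_blocks : Prop := ∀ (instructions : List String), Dom_get_instruction_blocks instructions → Spec_get_instruction_blocks instructions (get_instruction_blocks instructions)

-- ===== LEMMAS AND PROOFS =====

-- the element test both loops use
def pvCont (s : String) : Bool := !(PySem.Str.startswith s "inp")

-- canonical recursive splitting both ports are reduced to
def altRec : List String → List (List String)
  | [] => []
  | x :: xs => (x :: xs.takeWhile pvCont) :: altRec (xs.dropWhile pvCont)
termination_by l => l.length
decreasing_by
  have := List.length_dropWhile_le pvCont xs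
  simp only [List.length_cons]; omega

theorem take_len_takeWhile {α : Type} (p : α → Bool) (l : List α) :
    l.take (l.takeWhile p).length = l.takeWhile p := by
  induction l with
  | nil => simp
  | cons x xs ih =>
    by_cases h : p x <;> simp [h, List.take_succ_cons, ih]

theorem drop_len_takeWhile {α : Type} (p : α → Bool) (l : List α) :
    l.drop (l.takeWhile p).length = l.dropWhile p := by
  induction l with
  | nil => simp
  | cons x xs ih =>
    by_cases h : p x <;> simp [h, ih]

-- inner loop computes: final j = j + length of the run of non-boundary elements from j on
theorem altScan_eq (instructions : List String) (j : Nat) :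
    altScan instructions j = j + ((instructions.drop j).takeWhile pvCont).length := by
  fun_induction altScan with
  | case1 j h ih =>
    obtain ⟨hlt, hs⟩ := h
    have hd : instructions.drop j = instructions[j] :: instructions.drop (j + 1) :=
      List.drop_eq_getElem_cons hlt
    have hg : instructions.getD j "" = instructions[j] := by
      simp [List.getD, List.getElem?_eq_getElem hlt]
    rw [hg] at hs
    have hx : pvCont instructions[j] = true := by
      simp [pvCont]; simpa using hs
    rw [ih, hd, List.takeWhile_cons, hx]
    simp; omega
  | case2 j h =>
    by_cases hlt : j < instructions.length
    · have hs : PySem.Str.startswith (instructions.getD j "") "inp" = true := by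
        by_contra hs'
        exact h ⟨hlt, by simpa using hs'⟩
      have hg : instructions.getD j "" = instructions[j] := by
        simp [List.getD, List.getElem?_eq_getElem hlt]
      rw [hg] at hs
      have hd : instructions.drop j = instructions[j] :: instructions.drop (j + 1) :=
        List.drop_eq_getElem_cons hlt
      have hx : pvCont instructions[j] = false := by
        simp [pvCont]; simpa using hs
      rw [hd, List.takeWhile_cons, hx]
      simp
    · rw [List.drop_eq_nil_of_le (by omega)]
      simp

-- outer loop = canonical split of the remaining suffix, appended to blocks
theorem altLoop_eq (instructions : List String) (i : Nat) (blocks : List (List String)) :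
    altLoop instructions i blocks = blocks ++ altRec (instructions.drop i) := by
  fun_induction altLoop with
  | case1 i blocks h j ih =>
    have hd : instructions.drop i = instructions[i] :: instructions.drop (i + 1) :=
      List.drop_eq_getElem_cons h
    set t := ((instructions.drop (i + 1)).takeWhile pvCont).length with ht
    have hj : altScan instructions (i + 1) = i + 1 + t := altScan_eq instructions (i + 1)
    have hblock : (instructions.drop i).take (altScan instructions (i + 1) - i)
        = instructions[i] :: (instructions.drop (i + 1)).takeWhile pvCont := by
      rw [hj, hd]
      have h1 : i + 1 + t - i = t + 1 := by omega
      rw [h1, List.take_succ_cons, ht, take_len_takeWhile]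
    have hdropj : instructions.drop (altScan instructions (i + 1))
        = (instructions.drop (i + 1)).dropWhile pvCont := by
      rw [hj, ← drop_len_takeWhile pvCont (instructions.drop (i + 1)), List.drop_drop, ← ht]
    rw [ih, hblock, hdropj, hd, altRec]
    simp
  | case2 i blocks h =>
    rw [List.drop_eq_nil_of_le (by omega), altRec]
    simp

-- A's fold step and finishing test, named for the proofs
def pvStep (st : List (List String) × List String) (instruction : String) :
    List (List String) × List String :=
  if PySem.Str.startswith instruction "inp" then
    ((if st.2 ≠ [] then st.1 ++ [st.2] else st.1), [instruction])
  else
    (st.1, st.2 ++ [instruction])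

def pvFinish (st : List (List String) × List String) : List (List String) :=
  if st.2 ≠ [] then st.1 ++ [st.2] else st.1

-- finishing A's fold from a nonempty running block cur gives blocks ++ canonical split
theorem split_eq (xs : List String) :
    ∀ (blocks : List (List String)) (cur : List String), cur ≠ [] →
    pvFinish (xs.foldl pvStep (blocks, cur)) =
      blocks ++ ((cur ++ xs.takeWhile pvCont) :: altRec (xs.dropWhile pvCont)) := by
  induction xs with
  | nil => intro blocks cur hc; simp [pvFinish, hc, altRec]
  | cons x xs ih =>
    intro blocks cur hc
    by_cases h : PySem.Str.startswith x "inp" = true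
    · have h' : PySem.Chars.startswith x.toList ['i', 'n', 'p'] = true := by simpa using h
      have hstep : pvStep (blocks, cur) x = (blocks ++ [cur], [x]) := by
        simp [pvStep, h', hc]
      have hcont : pvCont x = false := by simp [pvCont]; exact h'
      rw [List.foldl_cons, hstep, ih _ _ (by simp),
        List.takeWhile_cons, List.dropWhile_cons, hcont]
      simp [altRec]
    · have h' : PySem.Chars.startswith x.toList ['i', 'n', 'p'] = false := by
        simpa using h
      have hstep : pvStep (blocks, cur) x = (blocks, cur ++ [x]) := by
        simp [pvStep, h']
      have hcont : pvCont x = true := by simp [pvCont]; exact h'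
      rw [List.foldl_cons, hstep, ih _ _ (by simp),
        List.takeWhile_cons, List.dropWhile_cons, hcont]
      simp

theorem portA_eq_altRec (instructions : List String) :
    get_instruction_blocks instructions = altRec instructions := by
  have hA : get_instruction_blocks instructions
      = pvFinish (instructions.foldl pvStep ([], [])) := rfl
  cases instructions with
  | nil => rw [hA]; simp [pvFinish, altRec]
  | cons x xs =>
    have hfirst : pvStep ([], []) x = ([], [x]) := by
      unfold pvStep; split <;> simp
    rw [hA, List.foldl_cons, hfirst, split_eq xs [] [x] (by simp), altRec]
    simp

theorem portB_eq_altRec (instructions : List String) :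
    get_instruction_blocks_alt instructions = altRec instructions := by
  rw [get_instruction_blocks_alt, altLoop_eq]
  simp

-- ===== VERDICT (by name: the statement is the Claim_ definition above) =====
theorem get_instruction_blocks_spec : Claim_equal_get_instruction_blocks := by
  intro instructions _
  unfold Spec_get_instruction_blocks
  rw [portA_eq_altRec, portB_eq_altRec]
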